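-- pv_equiv track=rewrite | github.com/qAp/kgl_deepfake | nbs/kernel_module.py | html_vids
-- ===== SOURCE A (Python) =====
-- def html_vid(fname):
--     "Return HTML for video."
--     return f'''
--     <video width="300" height="250" controls>
--     <source src="{fname}" type="video/mp4">
--     </video>
--     '''
--
-- def html_titled_vid(fname, title):
--     "Return HTML for titled video."
--     return f'<div><p>{title}</p><br>{html_vid(fname)}</div>'
--
-- def html_vids(fnames, titles=None, ncols=3):
--     "Return HTML for table of (titled) videos."
--     n = len(fnames)
--     if titles is None: titles = n * ['']
--     assert len(titles) == n
--     rs = []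
--     for i in range(0, n, ncols):
--         fs, ts = fnames[i:i+ncols], titles[i:i+ncols]
--         xs = (html_titled_vid(f, t) for f,t in zip(fs, ts))
--         xs = (f'<td>{x}</td>' for x in xs)
--         r = f"<tr>{''.join(xs)}</tr>"
--         rs.append(r)
--     return f"<table>{''.join(rs)}</table>"
-- ===== SOURCE B (Python) =====
-- def html_vid(fname):
--     "Return HTML for video."
--     return f'''
--     <video width="300" height="250" controls>
--     <source src="{fname}" type="video/mp4">
--     </video>
--     '''
--
-- def html_titled_vid(fname, title):
--     "Return HTML for titled video."
--     return f'<div><p>{title}</p><br>{html_vid(fname)}</div>'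
--
-- def html_vids(fnames, titles=None, ncols=3):
--     "Return HTML for table of (titled) videos."
--     n = len(fnames)
--     if titles is None: titles = n * ['']
--     assert len(titles) == n
--     def rows(pairs):
--         if not pairs or ncols <= 0:
--             return ''
--         row = ''.join('<td>' + html_titled_vid(f, t) + '</td>' for f, t in pairs[:ncols])
--         return '<tr>' + row + '</tr>' + rows(pairs[ncols:])
--     return '<table>' + rows(list(zip(fnames, titles))) + '</table>'
-- ===== Notes on version B (the rewrite author's own statement) =====
-- stated objective: alternative
-- what changed: B replaces A's loop over range(0, n, ncols) with index-based slicing of fnames and titles by a recursion on the zipped (fname, title) pair list that repeatedly splits off the next ncols pairs with take/drop and emits one row per step.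
import Mathlib
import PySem

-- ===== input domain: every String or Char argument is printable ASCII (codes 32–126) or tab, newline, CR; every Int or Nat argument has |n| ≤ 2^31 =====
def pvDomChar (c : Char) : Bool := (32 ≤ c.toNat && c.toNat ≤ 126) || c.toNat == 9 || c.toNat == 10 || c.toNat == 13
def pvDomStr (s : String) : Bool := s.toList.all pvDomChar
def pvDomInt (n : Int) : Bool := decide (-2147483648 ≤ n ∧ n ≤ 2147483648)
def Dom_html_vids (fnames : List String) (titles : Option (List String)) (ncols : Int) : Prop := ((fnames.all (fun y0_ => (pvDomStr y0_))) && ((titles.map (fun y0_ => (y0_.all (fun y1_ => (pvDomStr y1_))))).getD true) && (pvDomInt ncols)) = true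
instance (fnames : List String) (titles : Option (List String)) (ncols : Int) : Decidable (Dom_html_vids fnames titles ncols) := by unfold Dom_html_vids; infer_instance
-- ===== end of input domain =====

-- B replaces A's index-range row loop by a recursion that repeatedly splits off the next
-- ncols (fname, title) pairs with take/drop and emits that row; objective: alternative.

-- ===== PORT A =====
def html_vid (fname : String) : String :=
  "\n    <video width=\"300\" height=\"250\" controls>\n    <source src=\"" ++ fname ++ "\" type=\"video/mp4\">\n    </video>\n    "

def html_titled_vid (fname title : String) : String :=
  "<div><p>" ++ title ++ "</p><br>" ++ html_vid fname ++ "</div>"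

def html_vids (fnames : List String) (titles : Option (List String)) (ncols : Int) : String :=
  let n : Nat := fnames.length
  let titles' : List String := match titles with
    | none => List.replicate n ""
    | some ts => ts
  let rs : List String :=
    (PySem.List.pyRange 0 (n : Int) ncols).foldl (fun rs i =>
      let fs := PySem.List.slice fnames (some i) (some (i + ncols))
      let ts := PySem.List.slice titles' (some i) (some (i + ncols))
      let xs := (fs.zip ts).map (fun p => html_titled_vid p.1 p.2)
      let xs2 := xs.map (fun x => "<td>" ++ x ++ "</td>")
      rs ++ ["<tr>" ++ PySem.Str.join "" xs2 ++ "</tr>"]) []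
  "<table>" ++ PySem.Str.join "" rs ++ "</table>"

-- ===== PORT B =====
-- the '<td>…</td>' cell for one (fname, title) pair
def cellOf (p : String × String) : String :=
  "<td>" ++ html_titled_vid p.1 p.2 ++ "</td>"

-- B's inner recursion 'rows(pairs)': emit the first ncols pairs as a row, recurse on the rest
def rowsB (ncols : Int) (pairs : List (String × String)) : String :=
  if h : pairs = [] ∨ ncols ≤ 0 then ""
  else
    "<tr>" ++ PySem.Str.join "" ((PySem.List.slice pairs none (some ncols)).map cellOf) ++ "</tr>"
      ++ rowsB ncols (PySem.List.slice pairs (some ncols) none)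
termination_by pairs.length
decreasing_by
  push_neg at h
  rw [PySem.List.slice_from _ (by omega : (0:Int) ≤ ncols)]
  have h1 : 1 ≤ ncols.toNat := by omega
  have h2 : 0 < pairs.length := List.length_pos_iff.mpr h.1
  simp only [List.length_drop]
  omega

def html_vids_alt (fnames : List String) (titles : Option (List String)) (ncols : Int) : String :=
  let n : Nat := fnames.length
  let titles' : List String := match titles with
    | none => List.replicate n ""
    | some ts => ts
  "<table>" ++ rowsB ncols (fnames.zip titles') ++ "</table>"

-- ===== PRECONDITION & SPEC =====
-- Pre_ excludes exactly where A raises: ncols == 0 (range ValueError) and an explicit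
-- titles list whose length differs from len(fnames) (AssertionError).
def Pre_html_vids (fnames : List String) (titles : Option (List String)) (ncols : Int) : Prop :=
  ncols ≠ 0 ∧ (∀ ts, titles = some ts → ts.length = fnames.length)
instance (fnames : List String) (titles : Option (List String)) (ncols : Int) : Decidable (Pre_html_vids fnames titles ncols) := by unfold Pre_html_vids; infer_instance

def pvWitness_html_vids : List String × Option (List String) × Int := (["a.mp4", "b.mp4"], some ["t1", "t2"], 3)


def Spec_html_vids (fnames : List String) (titles : Option (List String)) (ncols : Int) (out : String) : Prop := out = html_vids_alt fnames titles ncols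
instance (fnames : List String) (titles : Option (List String)) (ncols : Int) (out : String) : Decidable (Spec_html_vids fnames titles ncols out) := by unfold Spec_html_vids; infer_instance

-- ===== CLAIM (what is proved, stated in full; the proofs are below) =====
def Claim_equal_html_vids : Prop := ∀ (fnames : List String) (titles : Option (List String)) (ncols : Int), Dom_html_vids fnames titles ncols → Pre_html_vids fnames titles ncols → Spec_html_vids fnames titles ncols (html_vids fnames titles ncols)


-- ===== LEMMAS AND PROOFS =====

lemma join_empty_cons (a : String) (l : List String) :
    PySem.Str.join "" (a :: l) = a ++ PySem.Str.join "" l := by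
  cases l with
  | nil => simp [PySem.Str.join, PySem.Chars.join, List.intercalate]
  | cons b t => simp [PySem.Str.join, PySem.Chars.join_cons_cons]

lemma zip_take_eq {α β : Type} (xs : List α) (ys : List β) (n : Nat) :
    (xs.zip ys).take n = (xs.take n).zip (ys.take n) := by
  induction xs generalizing ys n with
  | nil => simp
  | cons x xs ih =>
    cases ys with
    | nil => simp
    | cons y ys =>
      cases n with
      | zero => simp
      | succ m => simp [ih]

lemma zip_drop_eq {α β : Type} (xs : List α) (ys : List β) (n : Nat) :
    (xs.zip ys).drop n = (xs.drop n).zip (ys.drop n) := by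
  induction xs generalizing ys n with
  | nil => simp
  | cons x xs ih =>
    cases ys with
    | nil => simp
    | cons y ys =>
      cases n with
      | zero => simp
      | succ m => simp [ih]

-- slicing a map over a zip of equal-length lists = map over the zip of the slices
lemma slice_map_zip {α : Type} (xs ys : List String) (f : String × String → α)
    (h : ys.length = xs.length) (a b : Option Int) :
    PySem.List.slice ((xs.zip ys).map f) a b
      = ((PySem.List.slice xs a b).zip (PySem.List.slice ys a b)).map f := by
  have hlen : ((xs.zip ys).map f).length = xs.length := by simp [h]
  simp only [PySem.List.slice, hlen, h]
  rw [← List.map_drop, ← List.map_take, zip_drop_eq, zip_take_eq]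

lemma pyRange_pos_shift (a b c k : Int) (hk : 0 < k) :
    PySem.List.pyRange (a + c) (b + c) k = (PySem.List.pyRange a b k).map (· + c) := by
  rw [PySem.List.pyRange_of_pos _ _ hk, PySem.List.pyRange_of_pos _ _ hk, List.map_map]
  simp only [add_lt_add_iff_right, add_sub_add_right_eq_sub]
  apply List.map_congr_left; intro j _; simp [Function.comp]; ring

lemma pyRange_pos_cons (a b k : Int) (hk : 0 < k) (h : a < b) :
    PySem.List.pyRange a b k = a :: (PySem.List.pyRange (a + k) b k) := by
  rw [PySem.List.pyRange_of_pos _ _ hk, PySem.List.pyRange_of_pos _ _ hk]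
  by_cases h2 : a + k < b
  · rw [if_pos h, if_pos h2]
    have hc : ((b - a + k - 1) / k).toNat = ((b - (a + k) + k - 1) / k).toNat + 1 := by
      have he : b - a + k - 1 = (b - (a + k) + k - 1) + 1 * k := by ring
      rw [he, Int.add_mul_ediv_right _ _ (by omega : k ≠ 0)]
      have h0 : 0 ≤ (b - (a + k) + k - 1) / k := Int.ediv_nonneg (by omega) (by omega)
      omega
    rw [hc, List.range_succ_eq_map]
    simp only [List.map_cons, List.map_map, Nat.cast_zero, mul_zero, add_zero, List.cons.injEq]
    exact ⟨trivial, List.map_congr_left (fun j _ => by simp [Function.comp]; ring)⟩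
  · rw [if_pos h, if_neg h2]
    have hf : PySem.Int.floordiv (b - a + k - 1) k = 1 :=
      (PySem.Int.floordiv_eq_iff_of_pos hk).mpr ⟨by omega, by omega⟩
    rw [PySem.Int.floordiv_eq_ediv_of_pos hk] at hf
    rw [hf]
    simp

-- A's per-row loop over range(0, len(pairs), k), read on the zipped cell list, is B's recursion
lemma rows_eq (k : Int) (hk : 0 < k) (pairs : List (String × String)) :
    PySem.Str.join "" ((PySem.List.pyRange 0 (pairs.length : Int) k).map
      (fun i => "<tr>" ++ PySem.Str.join "" (PySem.List.slice (pairs.map cellOf) (some i) (some (i + k))) ++ "</tr>"))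
    = rowsB k pairs := by
  by_cases hnil : pairs = []
  · subst hnil
    rw [rowsB, dif_pos (Or.inl rfl)]
    rw [PySem.List.pyRange_of_pos _ _ hk, if_neg (by simp)]
    simp [PySem.Str.join, PySem.Chars.join, List.intercalate]
  · have hlen : (0 : Int) < (pairs.length : Int) := by
      have := List.length_pos_iff.mpr hnil; exact_mod_cast this
    rw [pyRange_pos_cons 0 _ k hk hlen, List.map_cons, join_empty_cons]
    rw [rowsB, dif_neg (by push_neg; exact ⟨hnil, by omega⟩)]
    have hhead : PySem.List.slice (pairs.map cellOf) (some 0) (some (0 + k))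
        = (PySem.List.slice pairs none (some k)).map cellOf := by
      simp only [PySem.List.slice_zero_start, zero_add]
      rw [PySem.List.slice_to _ (le_of_lt hk), PySem.List.slice_to _ (le_of_lt hk), List.map_take]
    rw [hhead]
    have htail :
        PySem.Str.join "" ((PySem.List.pyRange (0 + k) (pairs.length : Int) k).map
          (fun i => "<tr>" ++ PySem.Str.join "" (PySem.List.slice (pairs.map cellOf) (some i) (some (i + k))) ++ "</tr>"))
        = rowsB k (PySem.List.slice pairs (some k) none) := by
      have hdrop : PySem.List.slice pairs (some k) none = pairs.drop k.toNat :=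
        PySem.List.slice_from _ (le_of_lt hk)
      have hstop :
          PySem.List.pyRange 0 ((pairs.length : Int) - k) k
            = PySem.List.pyRange 0 ((pairs.drop k.toNat).length : Int) k := by
        by_cases hle : (pairs.length : Int) ≤ k
        · have h1 : pairs.length ≤ k.toNat := by omega
          rw [PySem.List.pyRange_of_pos _ _ hk, PySem.List.pyRange_of_pos _ _ hk,
              if_neg (by omega), if_neg (by simp only [List.length_drop]; omega)]
        · congr 1
          simp only [List.length_drop]
          omega
      have hshift : PySem.List.pyRange (0 + k) (pairs.length : Int) k
          = (PySem.List.pyRange 0 ((pairs.length : Int) - k) k).map (· + k) := by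
        have := pyRange_pos_shift 0 ((pairs.length : Int) - k) k k hk
        simpa using this
      rw [hshift, List.map_map, hstop, hdrop, ← rows_eq k hk (pairs.drop k.toNat)]
      refine congrArg (fun L => PySem.Str.join "" L) ?_
      apply List.map_congr_left
      intro i hi
      have h0i : 0 ≤ i := ((PySem.List.mem_pyRange_iff_of_pos hk i).mp hi).1
      simp only [Function.comp]
      have hslice : PySem.List.slice (pairs.map cellOf) (some (i + k)) (some (i + k + k))
          = PySem.List.slice ((pairs.drop k.toNat).map cellOf) (some i) (some (i + k)) := by
        rw [List.map_drop]
        rw [PySem.List.slice_toNat _ (by omega) (by omega),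
            PySem.List.slice_toNat _ h0i (by omega)]
        rw [List.drop_drop]
        congr 1
        · omega
        · congr 1
          omega
      rw [hslice]
    rw [htail]
termination_by pairs.length
decreasing_by
  have h2 : 0 < pairs.length := List.length_pos_iff.mpr hnil
  simp only [List.length_drop]
  omega

-- for a negative step and nonnegative stop, range(0, n, k) is empty
lemma pyRange_neg_nil (n k : Int) (hk : k < 0) (hn : 0 ≤ n) :
    PySem.List.pyRange 0 n k = [] := by
  unfold PySem.List.pyRange
  rw [if_neg (by omega)]
  rw [if_neg (by omega), if_neg (by omega)]
  simp

-- ===== VERDICT (by name: the statements are the Claim_ definitions above) =====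
theorem html_vids_spec : Claim_equal_html_vids := by
  intro fnames titles ncols _ hpre
  unfold Spec_html_vids html_vids html_vids_alt
  dsimp only
  have hlen : (match titles with
      | none => List.replicate fnames.length ""
      | some ts => ts).length = fnames.length := by
    cases titles with
    | none => simp
    | some ts => exact hpre.2 ts rfl
  set titles' := (match titles with
      | none => List.replicate fnames.length ""
      | some ts => ts) with htitles'
  rcases lt_or_gt_of_ne hpre.1 with hneg | hpos
  · rw [pyRange_neg_nil _ _ hneg (by omega)]
    rw [rowsB, dif_pos (Or.inr (le_of_lt hneg))]
    simp [PySem.Str.join, PySem.Chars.join, List.intercalate]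
  · simp only [PySem.List.foldl_append_singleton_eq_map, List.nil_append]
    have hzlen : ((fnames.zip titles').length : Int) = (fnames.length : Int) := by
      simp [List.length_zip, hlen]
    rw [← rows_eq ncols hpos (fnames.zip titles'), hzlen]
    refine congrArg (fun L => "<table>" ++ PySem.Str.join "" L ++ "</table>") ?_
    apply List.map_congr_left
    intro i _
    rw [slice_map_zip _ _ _ hlen]
    simp only [List.map_map]
    rfl
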